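-- pv_equiv track=rewrite | github.com/erlichon/autoplan-solutions | pddl/cleaning-robot-1/compare_variants.py | enumerate_plans
-- ===== SOURCE A (Python) =====
-- from collections import deque
-- from copy import deepcopy
--
-- CONNECTIONS = [("a", "b"), ("b", "a"), ("a", "c"), ("c", "a"),
--                ("b", "d"), ("d", "b"), ("c", "d"), ("d", "c")]
--
-- CONN_SET = set(CONNECTIONS)
--
-- def make_init():
--     return {"robot_at": "a", "unlocked": set(), "clean": set()}
--
-- def is_goal(state):
--     return "b" in state["clean"] and "c" in state["clean"]
--
-- def format_plan(actions):
--     return "".join(f"({name} {' '.join(args)})" for name, args in actions)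
--
-- def get_actions(state, *, bidir_open, idem_clean, sym_open_pre=False):
--     robot = state["robot_at"]
--     actions = []
--
--     for (x, y) in CONNECTIONS:
--         if robot == x and (x, y) in CONN_SET and (x, y) not in state["unlocked"]:
--             if sym_open_pre:
--                 if (y, x) not in state["unlocked"]:
--                     actions.append(("open", (x, y)))
--             else:
--                 actions.append(("open", (x, y)))
--
--     for (x, y) in CONNECTIONS:
--         if robot == x and (x, y) in CONN_SET and (x, y) in state["unlocked"]:
--             actions.append(("drive", (x, y)))
--
--     if idem_clean:
--         actions.append(("clean", (robot,)))
--     else: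
--         if robot not in state["clean"]:
--             actions.append(("clean", (robot,)))
--
--     return actions
--
-- def apply_action(state, action, *, bidir_open):
--     name, args = action
--     s = deepcopy(state)
--     if name == "open":
--         x, y = args
--         s["unlocked"].add((x, y))
--         if bidir_open:
--             s["unlocked"].add((y, x))
--     elif name == "drive":
--         s["robot_at"] = args[1]
--     elif name == "clean":
--         s["clean"].add(args[0])
--     return s
--
-- def enumerate_plans(bidir_open, idem_clean, sym_open_pre, max_depth):
--     queue = deque()
--     init = make_init()
--     queue.append((init, []))
--     plans_by_depth = {}
--     all_plans = set()
--
--     while queue: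
--         state, plan = queue.popleft()
--         depth = len(plan)
--         if depth > max_depth:
--             continue
--
--         if is_goal(state):
--             p = format_plan(plan)
--             if p not in all_plans:
--                 all_plans.add(p)
--                 plans_by_depth.setdefault(depth, []).append(p)
--             if depth < max_depth:
--                 for action in get_actions(state, bidir_open=bidir_open,
--                                           idem_clean=idem_clean,
--                                           sym_open_pre=sym_open_pre):
--                     new_state = apply_action(state, action, bidir_open=bidir_open)
--                     queue.append((new_state, plan + [action]))
--             continue
--
--         for action in get_actions(state, bidir_open=bidir_open,
--                                   idem_clean=idem_clean,
--                                   sym_open_pre=sym_open_pre):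
--             new_state = apply_action(state, action, bidir_open=bidir_open)
--             queue.append((new_state, plan + [action]))
--
--     return plans_by_depth, all_plans
-- ===== SOURCE B (Python) =====
-- # B: recursive DFS/backtracking instead of the deque BFS; per-depth buckets with
-- # per-bucket dedup, dict assembled by sorting bucket keys, all_plans = union of buckets.
-- CONNECTIONS = [("a", "b"), ("b", "a"), ("a", "c"), ("c", "a"),
--                ("b", "d"), ("d", "b"), ("c", "d"), ("d", "c")]
--
-- CONN_SET = set(CONNECTIONS)
--
-- def make_init():
--     return {"robot_at": "a", "unlocked": set(), "clean": set()}
--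
-- def is_goal(state):
--     return "b" in state["clean"] and "c" in state["clean"]
--
-- def format_plan(actions):
--     return "".join(f"({name} {' '.join(args)})" for name, args in actions)
--
-- def get_actions(state, *, bidir_open, idem_clean, sym_open_pre=False):
--     robot = state["robot_at"]
--     actions = []
--     for (x, y) in CONNECTIONS:
--         if robot == x and (x, y) in CONN_SET and (x, y) not in state["unlocked"]:
--             if sym_open_pre:
--                 if (y, x) not in state["unlocked"]:
--                     actions.append(("open", (x, y)))
--             else:
--                 actions.append(("open", (x, y)))
--     for (x, y) in CONNECTIONS:
--         if robot == x and (x, y) in CONN_SET and (x, y) in state["unlocked"]: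
--             actions.append(("drive", (x, y)))
--     if idem_clean:
--         actions.append(("clean", (robot,)))
--     else:
--         if robot not in state["clean"]:
--             actions.append(("clean", (robot,)))
--     return actions
--
-- def apply_action(state, action, *, bidir_open):
--     name, args = action
--     s = {"robot_at": state["robot_at"],
--          "unlocked": set(state["unlocked"]),
--          "clean": set(state["clean"])}
--     if name == "open":
--         x, y = args
--         s["unlocked"].add((x, y))
--         if bidir_open:
--             s["unlocked"].add((y, x))
--     elif name == "drive":
--         s["robot_at"] = args[1]
--     elif name == "clean":
--         s["clean"].add(args[0])
--     return s
--
-- def enumerate_plans(bidir_open, idem_clean, sym_open_pre, max_depth):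
--     buckets = {}
--
--     def rec(state, plan):
--         depth = len(plan)
--         if depth > max_depth:
--             return
--         if is_goal(state):
--             bucket = buckets.setdefault(depth, [])
--             p = format_plan(plan)
--             if p not in bucket:
--                 bucket.append(p)
--         for action in get_actions(state, bidir_open=bidir_open,
--                                   idem_clean=idem_clean,
--                                   sym_open_pre=sym_open_pre):
--             rec(apply_action(state, action, bidir_open=bidir_open),
--                 plan + [action])
--
--     rec(make_init(), [])
--     plans_by_depth = dict(sorted(buckets.items(), key=lambda kv: kv[0]))
--     all_plans = set(p for ps in plans_by_depth.values() for p in ps)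
--     return plans_by_depth, all_plans
-- ===== Notes on version B (the rewrite author's own statement) =====
-- stated objective: alternative
-- what changed: Replaces the deque-based BFS loop over (state, plan) pairs with a recursive DFS/backtracking enumerator that fills per-depth buckets (deduplicated within each bucket), assembles plans_by_depth by sorting the bucket keys, and takes all_plans as the union of the buckets.
import Mathlib
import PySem

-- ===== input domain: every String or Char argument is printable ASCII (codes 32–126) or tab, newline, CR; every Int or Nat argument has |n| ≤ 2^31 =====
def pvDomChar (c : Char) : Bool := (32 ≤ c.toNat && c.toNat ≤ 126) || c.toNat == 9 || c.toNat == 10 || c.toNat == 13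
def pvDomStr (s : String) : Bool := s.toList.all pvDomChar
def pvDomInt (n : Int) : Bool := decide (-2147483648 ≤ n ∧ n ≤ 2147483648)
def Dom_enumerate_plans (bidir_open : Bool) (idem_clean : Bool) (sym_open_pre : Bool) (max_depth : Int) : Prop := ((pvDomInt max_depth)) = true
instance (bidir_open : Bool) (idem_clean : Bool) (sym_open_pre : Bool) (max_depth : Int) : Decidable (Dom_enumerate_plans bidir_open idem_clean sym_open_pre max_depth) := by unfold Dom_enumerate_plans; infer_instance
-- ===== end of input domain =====

-- B (enumerate_plans_alt) replaces A's deque-based BFS with a recursive DFS/backtracking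
-- enumerator over per-depth buckets, sorting bucket keys at the end and taking all_plans as the
-- union of the buckets; a genuinely different traversal of the same search tree, similar cost.

-- ===== PORT A =====
structure RState where
  robot_at : String
  unlocked : PySem.Set (String × String)
  clean : PySem.Set String
deriving DecidableEq, Repr

def pvConnections : List (String × String) :=
  [("a","b"),("b","a"),("a","c"),("c","a"),("b","d"),("d","b"),("c","d"),("d","c")]
def pvConnSet : PySem.Set (String × String) := PySem.Set.ofList pvConnections
def pvMakeInit : RState := ⟨"a", PySem.Set.empty, PySem.Set.empty⟩
def pvIsGoal (s : RState) : Bool := PySem.Set.contains s.clean "b" && PySem.Set.contains s.clean "c"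
def pvFmtAction (a : String × List String) : String :=
  "(" ++ a.1 ++ " " ++ PySem.Str.join " " a.2 ++ ")"
def pvFormatPlan (acts : List (String × List String)) : String :=
  PySem.Str.join "" (acts.map pvFmtAction)

def pvOpenStep (s : RState) (sym_open_pre : Bool)
    (acc : List (String × List String)) (xy : String × String) : List (String × List String) :=
  if s.robot_at == xy.1 && PySem.Set.contains pvConnSet xy && !(PySem.Set.contains s.unlocked xy) then
    if sym_open_pre then
      if !(PySem.Set.contains s.unlocked (xy.2, xy.1)) then acc ++ [("open", [xy.1, xy.2])] else acc
    else acc ++ [("open", [xy.1, xy.2])]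
  else acc

def pvDriveStep (s : RState)
    (acc : List (String × List String)) (xy : String × String) : List (String × List String) :=
  if s.robot_at == xy.1 && PySem.Set.contains pvConnSet xy && PySem.Set.contains s.unlocked xy then
    acc ++ [("drive", [xy.1, xy.2])]
  else acc

def pvGetActions (s : RState) (bidir_open idem_clean sym_open_pre : Bool) : List (String × List String) :=
  let acts1 := pvConnections.foldl (pvOpenStep s sym_open_pre) []
  let acts2 := pvConnections.foldl (pvDriveStep s) acts1
  if idem_clean then acts2 ++ [("clean", [s.robot_at])]
  else if !(PySem.Set.contains s.clean s.robot_at) then acts2 ++ [("clean", [s.robot_at])] else acts2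

def pvApplyAction (s : RState) (a : String × List String) (bidir_open : Bool) : RState :=
  if a.1 == "open" then
    match a.2 with
    | [x, y] =>
      { s with unlocked := if bidir_open then PySem.Set.add (PySem.Set.add s.unlocked (x,y)) (y,x)
                           else PySem.Set.add s.unlocked (x,y) }
    | _ => s
  else if a.1 == "drive" then { s with robot_at := PySem.List.pyGetD a.2 1 "" }
  else if a.1 == "clean" then { s with clean := PySem.Set.add s.clean (PySem.List.pyGetD a.2 0 "") }
  else s

abbrev PNode := RState × List (String × List String)

def pvKids (bo ic so : Bool) (n : PNode) : List PNode :=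
  (pvGetActions n.1 bo ic so).map (fun a => (pvApplyAction n.1 a bo, n.2 ++ [a]))

def pvW (m : Int) (n : PNode) : Nat := 18 ^ (m + 1 - n.2.length).toNat
def pvQW (m : Int) (q : List PNode) : Nat := (q.map (pvW m)).sum

theorem pvFoldlLen {α β : Type} (f : List α → β → List α)
    (h : ∀ acc x, (f acc x).length ≤ acc.length + 1) :
    ∀ (l : List β) (acc : List α), (l.foldl f acc).length ≤ acc.length + l.length := by
  intro l
  induction l with
  | nil => intro acc; simp
  | cons x xs ih =>
    intro acc
    have := ih (f acc x)
    have := h acc x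
    simp only [List.foldl_cons, List.length_cons]
    omega

theorem pvGetActions_len (s : RState) (bo ic so : Bool) :
    (pvGetActions s bo ic so).length ≤ 17 := by
  unfold pvGetActions
  dsimp only
  have hc : pvConnections.length = 8 := rfl
  have e1 := pvFoldlLen (pvOpenStep s so)
    (by intro acc x; unfold pvOpenStep; split_ifs <;> simp) pvConnections []
  have e2 := pvFoldlLen (pvDriveStep s)
    (by intro acc x; unfold pvDriveStep; split_ifs <;> simp) pvConnections
    (pvConnections.foldl (pvOpenStep s so) [])
  simp only [List.length_nil, Nat.zero_add, hc] at e1 e2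
  split_ifs <;> (try simp only [List.length_append, List.length_cons, List.length_nil]) <;> omega

theorem pvKids_len (bo ic so : Bool) (n : PNode) : (pvKids bo ic so n).length ≤ 17 := by
  simpa [pvKids] using pvGetActions_len n.1 bo ic so

theorem pvQW_kids_le (bo ic so : Bool) (m : Int) (st : RState) (plan : List (String × List String)) :
    pvQW m (pvKids bo ic so (st, plan)) ≤ 17 * 18 ^ (m - plan.length).toNat := by
  have hlen := pvKids_len bo ic so (st, plan)
  have hW : ∀ k ∈ (pvKids bo ic so (st, plan)).map (pvW m), k = 18 ^ (m - plan.length).toNat := by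
    intro k hk
    simp only [pvKids, List.map_map, List.mem_map, Function.comp_apply] at hk
    obtain ⟨a, _, rfl⟩ := hk
    unfold pvW
    congr 1
    simp only [List.length_append, List.length_cons, List.length_nil, Nat.cast_add,
      Nat.cast_one, Nat.cast_zero]
    omega
  calc ((pvKids bo ic so (st, plan)).map (pvW m)).sum
      ≤ ((pvKids bo ic so (st, plan)).map (pvW m)).length * 18 ^ (m - plan.length).toNat := by
        apply List.sum_le_card_nsmul
        intro x hx; exact (hW x hx).le
    _ ≤ 17 * 18 ^ (m - plan.length).toNat := by
        have : ((pvKids bo ic so (st, plan)).map (pvW m)).length ≤ 17 := by simpa using hlen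
        exact Nat.mul_le_mul_right _ this

theorem pvW_gt (m : Int) (st : RState) (plan : List (String × List String))
    (h : ¬ ((plan.length : Int) > m)) :
    17 * 18 ^ (m - plan.length).toNat < pvW m (st, plan) := by
  have : (m + 1 - (plan.length:Int)).toNat = (m - plan.length).toNat + 1 := by omega
  simp only [pvW, this, pow_succ]
  have hp : 0 < 18 ^ (m - (plan.length:Int)).toNat := Nat.pow_pos (by norm_num)
  omega

def pvBfs (bo ic so : Bool) (m : Int) (q : List PNode)
    (pbd : PySem.Dict Int (List String)) (ap : PySem.Set String) :
    PySem.Dict Int (List String) × PySem.Set String :=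
  match q with
  | [] => (pbd, ap)
  | (st, plan) :: rest =>
    let depth : Int := plan.length
    if depth > m then pvBfs bo ic so m rest pbd ap
    else if pvIsGoal st then
      let p := pvFormatPlan plan
      let acc2 := if PySem.Set.contains ap p then (pbd, ap)
        else (pbd.insert depth (pbd.getD depth [] ++ [p]), PySem.Set.add ap p)
      if depth < m then pvBfs bo ic so m (rest ++ pvKids bo ic so (st, plan)) acc2.1 acc2.2
      else pvBfs bo ic so m rest acc2.1 acc2.2
    else pvBfs bo ic so m (rest ++ pvKids bo ic so (st, plan)) pbd ap
termination_by pvQW m q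
decreasing_by
  · have : 0 < pvW m (st, plan) := Nat.pow_pos (by norm_num)
    simp only [pvQW, List.map_cons, List.sum_cons]
    omega
  · have h1 := pvQW_kids_le bo ic so m st plan
    have h2 := pvW_gt m st plan (by assumption)
    simp only [pvQW, List.map_cons, List.sum_cons, List.map_append, List.sum_append]
    simp only [pvQW] at h1
    omega
  · have : 0 < pvW m (st, plan) := Nat.pow_pos (by norm_num)
    simp only [pvQW, List.map_cons, List.sum_cons]
    omega
  · have h1 := pvQW_kids_le bo ic so m st plan
    have h2 := pvW_gt m st plan (by assumption)
    simp only [pvQW, List.map_cons, List.sum_cons, List.map_append, List.sum_append]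
    simp only [pvQW] at h1
    omega

def enumerate_plans (bidir_open : Bool) (idem_clean : Bool) (sym_open_pre : Bool) (max_depth : Int) :
    (List (Int × List String)) × List String :=
  let r := pvBfs bidir_open idem_clean sym_open_pre max_depth [(pvMakeInit, [])] PySem.Dict.empty PySem.Set.empty
  (r.1.items, r.2)

mutual
def pvDfs (bo ic so : Bool) (m : Int) (st : RState) (plan : List (String × List String))
    (buckets : PySem.Dict Int (List String)) : PySem.Dict Int (List String) :=
  let depth : Int := plan.length
  if depth > m then buckets
  else
    let b1 := if pvIsGoal st then
        let bs := buckets.setdefault depth []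
        let bucket := bs.getD depth []
        let p := pvFormatPlan plan
        if bucket.contains p then bs else bs.insert depth (bucket ++ [p])
      else buckets
    pvDfsList bo ic so m st plan (pvGetActions st bo ic so) b1
termination_by ((m + 1 - plan.length).toNat, 0)

def pvDfsList (bo ic so : Bool) (m : Int) (st : RState) (plan : List (String × List String))
    (acts : List (String × List String)) (bs : PySem.Dict Int (List String)) :
    PySem.Dict Int (List String) :=
  match acts with
  | [] => bs
  | a :: rest =>
    pvDfsList bo ic so m st plan rest (pvDfs bo ic so m (pvApplyAction st a bo) (plan ++ [a]) bs)
termination_by ((m - plan.length).toNat, acts.length + 1)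
end

def enumerate_plans_alt (bidir_open : Bool) (idem_clean : Bool) (sym_open_pre : Bool) (max_depth : Int) :
    (List (Int × List String)) × List String :=
  let buckets := pvDfs bidir_open idem_clean sym_open_pre max_depth pvMakeInit [] PySem.Dict.empty
  let sortedItems := PySem.List.sorted buckets.items (fun kv => kv.1) false
  let pbd := PySem.Dict.ofList sortedItems
  (pbd.items, PySem.Set.ofList pbd.values.flatten)

-- ===== PRECONDITION & SPEC =====
def Spec_enumerate_plans (bidir_open : Bool) (idem_clean : Bool) (sym_open_pre : Bool) (max_depth : Int) (out : (List (Int × List String)) × List String) : Prop := out = enumerate_plans_alt bidir_open idem_clean sym_open_pre max_depth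
instance (bidir_open : Bool) (idem_clean : Bool) (sym_open_pre : Bool) (max_depth : Int) (out : (List (Int × List String)) × List String) : Decidable (Spec_enumerate_plans bidir_open idem_clean sym_open_pre max_depth out) := by unfold Spec_enumerate_plans; infer_instance

-- ===== CLAIM (what is proved, stated in full; the proofs are below) =====
def Claim_equal_enumerate_plans : Prop := ∀ (bidir_open : Bool) (idem_clean : Bool) (sym_open_pre : Bool) (max_depth : Int), Dom_enumerate_plans bidir_open idem_clean sym_open_pre max_depth → Spec_enumerate_plans bidir_open idem_clean sym_open_pre max_depth (enumerate_plans bidir_open idem_clean sym_open_pre max_depth)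

-- ===== LEMMAS AND PROOFS =====

-- ---- spec-side definitions: the per-depth goal/plan sequence both traversals generate ----

/-- goal record emitted at a node: its depth and formatted plan, if it is a goal state. -/
def pvGoalRec (n : PNode) : List (Int × String) :=
  if pvIsGoal n.1 then [((n.2.length : Int), pvFormatPlan n.2)] else []

/-- children enqueued by the BFS for a node popped at depth ≤ m. -/
def pvAKids (bo ic so : Bool) (m : Int) (n : PNode) : List PNode :=
  if pvIsGoal n.1 ∧ ¬ ((n.2.length : Int) < m) then [] else pvKids bo ic so n

/-- effective children: nodes whose own subtree can still contribute (depth < m). -/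
def pvEKids (bo ic so : Bool) (m : Int) (n : PNode) : List PNode :=
  if (n.2.length : Int) < m then pvKids bo ic so n else []

/-- breadth-first (level by level) sequence of goal records, k levels. -/
def pvSeqFrom (bo ic so : Bool) (m : Int) : Nat → List PNode → List (Int × String)
  | 0, _ => []
  | k+1, ns => ns.flatMap pvGoalRec ++ pvSeqFrom bo ic so m k (ns.flatMap (pvEKids bo ic so m))

/-- depth-first (pre-order) sequence of goal records from one node, fuelled. -/
def pvPreSeq (bo ic so : Bool) (m : Int) : Nat → PNode → List (Int × String)
  | 0, _ => []
  | k+1, n =>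
    if (n.2.length : Int) > m then []
    else pvGoalRec n ++ (pvKids bo ic so n).flatMap (pvPreSeq bo ic so m k)

/-- accumulator step of the BFS (global dedup set + bucket append). -/
def pvStepA (acc : PySem.Dict Int (List String) × PySem.Set String) (q : Int × String) :
    PySem.Dict Int (List String) × PySem.Set String :=
  if PySem.Set.contains acc.2 q.2 then acc
  else (acc.1.insert q.1 (acc.1.getD q.1 [] ++ [q.2]), PySem.Set.add acc.2 q.2)

/-- accumulator step of the DFS (per-bucket dedup). -/
def pvStepB (bs : PySem.Dict Int (List String)) (q : Int × String) : PySem.Dict Int (List String) :=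
  let bs' := bs.setdefault q.1 []
  let bucket := bs'.getD q.1 []
  if bucket.contains q.2 then bs' else bs'.insert q.1 (bucket ++ [q.2])

-- ---- basic facts ----

theorem pvKids_depth (bo ic so : Bool) (n : PNode) :
    ∀ c ∈ pvKids bo ic so n, c.2.length = n.2.length + 1 := by
  intro c hc
  simp only [pvKids, List.mem_map] at hc
  obtain ⟨a, _, rfl⟩ := hc
  simp

theorem pvBfs_junk (bo ic so : Bool) (m : Int) :
    ∀ (q : List PNode) pbd ap, (∀ n ∈ q, m < (n.2.length : Int)) →
    pvBfs bo ic so m q pbd ap = (pbd, ap) := by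
  intro q
  induction q with
  | nil => intro pbd ap _; rw [pvBfs]
  | cons n rest ih =>
    intro pbd ap h
    obtain ⟨st, plan⟩ := n
    rw [pvBfs]
    have hd : ((plan.length : Int) > m) := h (st, plan) (by simp)
    simp only [hd, if_pos]
    exact ih pbd ap (fun n hn => h n (List.mem_cons_of_mem _ hn))

theorem pvBfs_level (bo ic so : Bool) (m : Int) (d : Nat) (hdm : (d : Int) ≤ m) :
    ∀ (cur next : List PNode) pbd ap,
      (∀ n ∈ cur, n.2.length = d) → (∀ n ∈ next, n.2.length = d + 1) →
      pvBfs bo ic so m (cur ++ next) pbd ap =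
        pvBfs bo ic so m (next ++ cur.flatMap (pvAKids bo ic so m))
          ((cur.flatMap pvGoalRec).foldl pvStepA (pbd, ap)).1
          ((cur.flatMap pvGoalRec).foldl pvStepA (pbd, ap)).2 := by
  intro cur
  induction cur with
  | nil =>
    intro next pbd ap _ _
    simp
  | cons n cur' ih =>
    obtain ⟨st, plan⟩ := n
    intro next pbd ap hcur hnext
    have hd : plan.length = d := hcur (st, plan) (by simp)
    have hng : ¬ ((plan.length : Int) > m) := by rw [hd]; omega
    have hkd : ∀ c ∈ pvKids bo ic so (st, plan), c.2.length = d + 1 := by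
      intro c hc; rw [← hd]; exact pvKids_depth bo ic so (st, plan) c hc
    have hcur' : ∀ n ∈ cur', n.2.length = d := fun n hn => hcur n (List.mem_cons_of_mem _ hn)
    rw [List.cons_append, pvBfs]
    simp only [if_neg hng]
    by_cases hg : pvIsGoal st = true
    · rw [if_pos hg]
      by_cases hlt : (plan.length : Int) < m
      · rw [if_pos hlt]
        have step := ih (next ++ pvKids bo ic so (st, plan)) 
          (pvStepA (pbd, ap) ((plan.length : Int), pvFormatPlan plan)).1
          (pvStepA (pbd, ap) ((plan.length : Int), pvFormatPlan plan)).2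
          hcur'
          (by intro n hn
              rcases List.mem_append.mp hn with h | h
              · exact hnext n h
              · exact hkd n h)
        rw [List.append_assoc] at step
        rw [show ((cur' ++ next) ++ pvKids bo ic so (st, plan)) = cur' ++ (next ++ pvKids bo ic so (st, plan)) from by rw [List.append_assoc]]
        rw [pvStepA] at step
        dsimp only at step ⊢
        rw [step]
        have hak : pvAKids bo ic so m (st, plan) = pvKids bo ic so (st, plan) := by
          unfold pvAKids
          rw [if_neg]; simp [hlt]
        simp only [List.flatMap_cons, pvGoalRec, if_pos hg, List.singleton_append,
          List.foldl_cons, hak, List.append_assoc]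
        rfl
      · rw [if_neg hlt]
        have step := ih next
          (pvStepA (pbd, ap) ((plan.length : Int), pvFormatPlan plan)).1
          (pvStepA (pbd, ap) ((plan.length : Int), pvFormatPlan plan)).2
          hcur' hnext
        rw [pvStepA] at step
        dsimp only at step ⊢
        rw [step]
        have hak : pvAKids bo ic so m (st, plan) = [] := by
          unfold pvAKids
          rw [if_pos]; exact ⟨hg, hlt⟩
        simp only [List.flatMap_cons, pvGoalRec, if_pos hg, List.singleton_append,
          List.foldl_cons, hak, List.nil_append]
        rfl
    · rw [if_neg hg]
      have step := ih (next ++ pvKids bo ic so (st, plan)) pbd ap hcur'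
        (by intro n hn
            rcases List.mem_append.mp hn with h | h
            · exact hnext n h
            · exact hkd n h)
      rw [List.append_assoc] at step
      rw [show ((cur' ++ next) ++ pvKids bo ic so (st, plan)) = cur' ++ (next ++ pvKids bo ic so (st, plan)) from by rw [List.append_assoc]]
      rw [step]
      have hak : pvAKids bo ic so m (st, plan) = pvKids bo ic so (st, plan) := by
        unfold pvAKids
        rw [if_neg]; simp [hg]
      simp only [List.flatMap_cons, pvGoalRec, if_neg hg, List.nil_append, hak, List.append_assoc]

theorem pvBfs_levels (bo ic so : Bool) (m : Int) :
    ∀ (k : Nat) (d : Nat) (q : List PNode) pbd ap,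
      (∀ n ∈ q, n.2.length = d) → (d : Int) ≤ m → k = (m + 1 - d).toNat →
      pvBfs bo ic so m q pbd ap = (pvSeqFrom bo ic so m k q).foldl pvStepA (pbd, ap) := by
  intro k
  induction k with
  | zero => intro d q pbd ap hq hdm hk; exfalso; omega
  | succ k ih =>
    intro d q pbd ap hq hdm hk
    have step := pvBfs_level bo ic so m d hdm q [] pbd ap hq (by simp)
    rw [List.append_nil] at step
    rw [step, List.nil_append]
    by_cases hlt : (d : Int) < m
    · have hek : q.flatMap (pvAKids bo ic so m) = q.flatMap (pvEKids bo ic so m) := by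
        apply List.flatMap_congr
        intro n hn
        have hnd : n.2.length = d := hq n hn
        unfold pvAKids pvEKids
        rw [hnd]
        rw [if_neg (by simp [hlt]), if_pos hlt]
      have hdep : ∀ n ∈ q.flatMap (pvEKids bo ic so m), n.2.length = d + 1 := by
        intro n hn
        rw [List.mem_flatMap] at hn
        obtain ⟨p, hp, hnp⟩ := hn
        unfold pvEKids at hnp
        split at hnp
        · have := pvKids_depth bo ic so p n hnp
          rw [this, hq p hp]
        · simp at hnp
      rw [hek, ih (d+1) _ _ _ hdep (by push_cast; omega) (by omega)]
      simp only [pvSeqFrom, List.foldl_append]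
    · have hjunk : ∀ n ∈ q.flatMap (pvAKids bo ic so m), m < (n.2.length : Int) := by
        intro n hn
        rw [List.mem_flatMap] at hn
        obtain ⟨p, hp, hnp⟩ := hn
        unfold pvAKids at hnp
        split at hnp
        · simp at hnp
        · have := pvKids_depth bo ic so p n hnp
          rw [this, hq p hp]
          push_cast
          omega
      rw [pvBfs_junk bo ic so m _ _ _ hjunk]
      have hk0 : k = 0 := by omega
      subst hk0
      simp only [pvSeqFrom, List.foldl_append, List.foldl_nil]

theorem pvDfs_eq_foldl (bo ic so : Bool) (m : Int) :
    ∀ (k : Nat) (st : RState) (plan : List (String × List String)) bs,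
      (m + 1 - (plan.length : Int)).toNat < k →
      pvDfs bo ic so m st plan bs = (pvPreSeq bo ic so m k (st, plan)).foldl pvStepB bs := by
  intro k
  induction k with
  | zero => intro st plan bs h; exfalso; omega
  | succ k ih =>
    intro st plan bs h
    rw [pvDfs]
    by_cases hgm : (plan.length : Int) > m
    · rw [if_pos hgm]
      simp [pvPreSeq, hgm]
    · rw [if_neg hgm]
      have hlist : ∀ (acts : List (String × List String)) bs',
          pvDfsList bo ic so m st plan acts bs' =
          (acts.flatMap (fun a => pvPreSeq bo ic so m k (pvApplyAction st a bo, plan ++ [a]))).foldl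
            pvStepB bs' := by
        intro acts
        induction acts with
        | nil => intro bs'; rw [pvDfsList]; simp
        | cons a rest iha =>
          intro bs'
          rw [pvDfsList]
          rw [ih (pvApplyAction st a bo) (plan ++ [a]) bs'
            (by simp only [List.length_append, List.length_cons, List.length_nil]; omega)]
          rw [iha]
          simp [List.foldl_append]
      dsimp only
      rw [hlist]
      have hpre : pvPreSeq bo ic so m (k+1) (st, plan) =
          pvGoalRec (st, plan) ++ (pvKids bo ic so (st, plan)).flatMap (pvPreSeq bo ic so m k) := by
        rw [pvPreSeq, if_neg hgm]
      rw [hpre, List.foldl_append]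
      have hflat : (pvKids bo ic so (st, plan)).flatMap (pvPreSeq bo ic so m k) =
          (pvGetActions st bo ic so).flatMap
            (fun a => pvPreSeq bo ic so m k (pvApplyAction st a bo, plan ++ [a])) := by
        simp [pvKids, List.flatMap_map]
      rw [hflat]
      congr 1
      by_cases hg : pvIsGoal st = true
      · simp only [pvGoalRec, if_pos hg, List.foldl_cons, List.foldl_nil, if_pos hg]
        rfl
      · simp only [pvGoalRec, if_neg hg, List.foldl_nil, if_neg hg]

-- ---- the pre-order and the level order have the same per-depth subsequences ----

theorem pvPreSeq_fst_le (bo ic so : Bool) (m : Int) :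
    ∀ (k : Nat) (n : PNode) q, q ∈ pvPreSeq bo ic so m k n → (n.2.length : Int) ≤ q.1 := by
  intro k
  induction k with
  | zero => intro n q hq; simp [pvPreSeq] at hq
  | succ k ih =>
    intro n q hq
    rw [pvPreSeq] at hq
    split at hq
    · simp at hq
    · rcases List.mem_append.mp hq with h | h
      · unfold pvGoalRec at h
        split at h <;> simp at h
        rw [h]
      · rw [List.mem_flatMap] at h
        obtain ⟨c, hc, hqc⟩ := h
        have h1 := ih c q hqc
        have h2 := pvKids_depth bo ic so n c hc
        rw [h2] at h1
        push_cast at h1 ⊢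
        omega

theorem pvSeqFrom_fst_le (bo ic so : Bool) (m : Int) :
    ∀ (k : Nat) (d : Nat) (ns : List PNode), (∀ n ∈ ns, n.2.length = d) →
      ∀ q ∈ pvSeqFrom bo ic so m k ns, (d : Int) ≤ q.1 := by
  intro k
  induction k with
  | zero => intro d ns hns q hq; simp [pvSeqFrom] at hq
  | succ k ih =>
    intro d ns hns q hq
    rw [pvSeqFrom] at hq
    rcases List.mem_append.mp hq with h | h
    · rw [List.mem_flatMap] at h
      obtain ⟨n, hn, hqn⟩ := h
      unfold pvGoalRec at hqn
      split at hqn <;> simp at hqn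
      rw [hqn, hns n hn]
    · have hdep : ∀ n ∈ ns.flatMap (pvEKids bo ic so m), n.2.length = d + 1 := by
        intro c hc
        rw [List.mem_flatMap] at hc
        obtain ⟨p, hp, hcp⟩ := hc
        unfold pvEKids at hcp
        split at hcp
        · rw [pvKids_depth bo ic so p c hcp, hns p hp]
        · simp at hcp
      have := ih (d+1) _ hdep q h
      push_cast at this ⊢
      omega

theorem pvFilter_pre_eq_level (bo ic so : Bool) (m : Int) :
    ∀ (k F : Nat) (d0 : Nat) (ns : List PNode),
      (∀ n ∈ ns, n.2.length = d0) → k = (m + 1 - d0).toNat → k + 1 ≤ F →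
      ∀ d : Int,
        (ns.flatMap (pvPreSeq bo ic so m F)).filter (fun q => q.1 == d) =
        (pvSeqFrom bo ic so m k ns).filter (fun q => q.1 == d) := by
  intro k
  induction k with
  | zero =>
    intro F d0 ns hns hk hF d
    have hd0 : m < (d0 : Int) := by omega
    obtain ⟨F', rfl⟩ : ∃ F', F = F' + 1 := ⟨F - 1, by omega⟩
    have hnil : ns.flatMap (pvPreSeq bo ic so m (F'+1)) = [] := by
      rw [List.flatMap_eq_nil_iff]
      intro n hn
      rw [pvPreSeq, if_pos (by rw [hns n hn]; omega)]
    rw [hnil]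
    simp [pvSeqFrom]
  | succ k ih =>
    intro F d0 ns hns hk hF d
    have hd0m : (d0 : Int) ≤ m := by omega
    obtain ⟨F', rfl⟩ : ∃ F', F = F' + 1 := ⟨F - 1, by omega⟩
    have hexp : ns.flatMap (pvPreSeq bo ic so m (F'+1)) =
        ns.flatMap (fun n => pvGoalRec n ++ (pvKids bo ic so n).flatMap (pvPreSeq bo ic so m F')) := by
      apply List.flatMap_congr
      intro n hn
      rw [pvPreSeq, if_neg (by rw [hns n hn]; omega)]
    have hdepnext : ∀ n ∈ ns.flatMap (pvEKids bo ic so m), n.2.length = d0 + 1 := by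
      intro c hc
      rw [List.mem_flatMap] at hc
      obtain ⟨p, hp, hcp⟩ := hc
      unfold pvEKids at hcp
      split at hcp
      · rw [pvKids_depth bo ic so p c hcp, hns p hp]
      · simp at hcp
    rw [hexp, pvSeqFrom, List.filter_append, List.filter_flatMap, List.filter_flatMap]
    by_cases hd : d = (d0 : Int)
    · subst hd
      have hgr : ∀ n ∈ ns, (pvGoalRec n).filter (fun q => q.1 == (d0:Int)) = pvGoalRec n := by
        intro n hn
        unfold pvGoalRec
        split
        · simp [hns n hn]
        · simp
      have hdeep : ∀ n ∈ ns,
          (((pvKids bo ic so n).flatMap (pvPreSeq bo ic so m F')).filter (fun q => q.1 == (d0:Int))) = [] := by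
        intro n hn
        rw [List.filter_eq_nil_iff]
        intro q hq
        rw [List.mem_flatMap] at hq
        obtain ⟨c, hc, hqc⟩ := hq
        have h1 := pvPreSeq_fst_le bo ic so m F' c q hqc
        have h2 := pvKids_depth bo ic so n c hc
        rw [h2, hns n hn] at h1
        simp only [beq_iff_eq]
        push_cast at h1
        omega
      have hlvl : (pvSeqFrom bo ic so m k (ns.flatMap (pvEKids bo ic so m))).filter
          (fun q => q.1 == (d0:Int)) = [] := by
        rw [List.filter_eq_nil_iff]
        intro q hq
        have := pvSeqFrom_fst_le bo ic so m k (d0+1) _ hdepnext q hq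
        simp only [beq_iff_eq]
        push_cast at this
        omega
      rw [hlvl, List.append_nil]
      rw [List.flatMap_congr (fun n hn => by
        rw [List.filter_append, hgr n hn, hdeep n hn, List.append_nil])]
      exact (List.flatMap_congr (fun n hn => (hgr n hn).symm))
    · have hgr0 : ∀ n ∈ ns, (pvGoalRec n).filter (fun q => q.1 == d) = [] := by
        intro n hn
        unfold pvGoalRec
        split
        · simp only [List.filter_cons, List.filter_nil]
          rw [if_neg (by simp [hns n hn]; omega)]
        · simp
      have hgr0' : ns.flatMap (fun a => (pvGoalRec a).filter (fun q => q.1 == d)) = [] := by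
        rw [List.flatMap_eq_nil_iff]
        intro n hn
        exact hgr0 n hn
      rw [hgr0', List.nil_append]
      rw [List.flatMap_congr (fun n hn => by
        rw [List.filter_append, hgr0 n hn, List.nil_append])]
      by_cases hlt : (d0 : Int) < m
      · have hkek : ∀ n ∈ ns, ((pvKids bo ic so n).flatMap (pvPreSeq bo ic so m F')).filter (fun q => q.1 == d) =
            ((pvEKids bo ic so m n).flatMap (pvPreSeq bo ic so m F')).filter (fun q => q.1 == d) := by
          intro n hn
          unfold pvEKids
          rw [if_pos (by rw [hns n hn]; omega)]
        rw [List.flatMap_congr hkek]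
        have := ih F' (d0+1) (ns.flatMap (pvEKids bo ic so m)) hdepnext (by omega) (by omega) d
        rw [← this, List.filter_flatMap, List.flatMap_assoc]
        simp only [List.filter_flatMap]
      · have hd0m' : (d0 : Int) = m := by omega
        have hknil : ∀ n ∈ ns, ((pvKids bo ic so n).flatMap (pvPreSeq bo ic so m F')).filter (fun q => q.1 == d) = [] := by
          intro n hn
          have : (pvKids bo ic so n).flatMap (pvPreSeq bo ic so m F') = [] := by
            rw [List.flatMap_eq_nil_iff]
            intro c hc
            obtain ⟨F'', rfl⟩ : ∃ F'', F' = F'' + 1 := ⟨F' - 1, by omega⟩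
            rw [pvPreSeq, if_pos (by
              rw [pvKids_depth bo ic so n c hc, hns n hn]
              push_cast
              omega)]
          rw [this, List.filter_nil]
        rw [List.flatMap_congr hknil]
        have hk0 : k = 0 := by omega
        subst hk0
        simp [pvSeqFrom]

-- ---- goodness: reachable plans format with one '(' per action ----

def pvGoodState (s : RState) : Prop :=
  s.robot_at = "a" ∨ s.robot_at = "b" ∨ s.robot_at = "c" ∨ s.robot_at = "d"

def pvGoodAct (a : String × List String) : Prop :=
  a.1.toList.count '(' = 0 ∧ ∀ x ∈ a.2, x.toList.count '(' = 0

def pvGoodNode (n : PNode) : Prop := pvGoodState n.1 ∧ ∀ a ∈ n.2, pvGoodAct a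

theorem pvConnGood : ∀ xy ∈ pvConnections,
    xy.1.toList.count '(' = 0 ∧ xy.2.toList.count '(' = 0 ∧
    (xy.2 = "a" ∨ xy.2 = "b" ∨ xy.2 = "c" ∨ xy.2 = "d") := by
  decide

theorem pvMemOpenFold (s : RState) (so : Bool) :
    ∀ (l : List (String × String)) acc a, a ∈ l.foldl (pvOpenStep s so) acc →
      a ∈ acc ∨ ∃ xy ∈ l, a = ("open", [xy.1, xy.2]) := by
  intro l
  induction l with
  | nil => intro acc a ha; exact Or.inl ha
  | cons x xs ih =>
    intro acc a ha
    rcases ih (pvOpenStep s so acc x) a ha with h | h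
    · unfold pvOpenStep at h
      split_ifs at h <;> (try rcases List.mem_append.mp h with h' | h')
      all_goals first
        | exact Or.inl h
        | exact Or.inl h'
        | (simp at h'; exact Or.inr ⟨x, by simp, by simp [h']⟩)
    · obtain ⟨xy, hxy, hxya⟩ := h
      exact Or.inr ⟨xy, List.mem_cons_of_mem _ hxy, hxya⟩

theorem pvMemDriveFold (s : RState) :
    ∀ (l : List (String × String)) acc a, a ∈ l.foldl (pvDriveStep s) acc →
      a ∈ acc ∨ ∃ xy ∈ l, a = ("drive", [xy.1, xy.2]) := by
  intro l
  induction l with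
  | nil => intro acc a ha; exact Or.inl ha
  | cons x xs ih =>
    intro acc a ha
    rcases ih (pvDriveStep s acc x) a ha with h | h
    · unfold pvDriveStep at h
      split_ifs at h <;> (try rcases List.mem_append.mp h with h' | h')
      all_goals first
        | exact Or.inl h
        | exact Or.inl h'
        | (simp at h'; exact Or.inr ⟨x, by simp, by simp [h']⟩)
    · obtain ⟨xy, hxy, hxya⟩ := h
      exact Or.inr ⟨xy, List.mem_cons_of_mem _ hxy, hxya⟩

theorem pvGetActions_cases (s : RState) (bo ic so : Bool) :
    ∀ a ∈ pvGetActions s bo ic so,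
      (∃ xy ∈ pvConnections, a = ("open", [xy.1, xy.2]) ∨ a = ("drive", [xy.1, xy.2])) ∨
      a = ("clean", [s.robot_at]) := by
  intro a ha
  unfold pvGetActions at ha
  dsimp only at ha
  have core : ∀ h : a ∈ pvConnections.foldl (pvDriveStep s) (pvConnections.foldl (pvOpenStep s so) []),
      (∃ xy ∈ pvConnections, a = ("open", [xy.1, xy.2]) ∨ a = ("drive", [xy.1, xy.2])) := by
    intro h
    rcases pvMemDriveFold s pvConnections _ a h with h2 | h2
    · rcases pvMemOpenFold s so pvConnections _ a h2 with h3 | h3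
      · simp at h3
      · obtain ⟨xy, hxy, h4⟩ := h3
        exact ⟨xy, hxy, Or.inl h4⟩
    · obtain ⟨xy, hxy, h4⟩ := h2
      exact ⟨xy, hxy, Or.inr h4⟩
  split_ifs at ha <;>
    (try rcases List.mem_append.mp ha with h | h) <;>
    first
      | exact Or.inl (core ha)
      | exact Or.inl (core h)
      | (simp at h; exact Or.inr h)

theorem pvGetActions_good (s : RState) (bo ic so : Bool) (hs : pvGoodState s) :
    ∀ a ∈ pvGetActions s bo ic so, pvGoodAct a ∧ pvGoodState (pvApplyAction s a bo) := by
  intro a ha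
  have hrob : s.robot_at.toList.count '(' = 0 := by
    rcases hs with h | h | h | h <;> rw [h] <;> decide
  rcases pvGetActions_cases s bo ic so a ha with ⟨xy, hxy, hcase⟩ | hcase
  · obtain ⟨h1, h2, h3⟩ := pvConnGood xy hxy
    have hargs : ∀ x ∈ [xy.1, xy.2], x.toList.count '(' = 0 := by
      intro x hx
      rcases List.mem_cons.mp hx with rfl | hx
      · exact h1
      · rcases List.mem_cons.mp hx with rfl | hx
        · exact h2
        · simp at hx
    rcases hcase with rfl | rfl
    · refine ⟨⟨by change List.count '(' "open".toList = 0; decide, hargs⟩, ?_⟩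
      unfold pvApplyAction
      rw [if_pos (by change ("open" == "open") = true; decide)]
      exact hs
    · refine ⟨⟨by change List.count '(' "drive".toList = 0; decide, hargs⟩, ?_⟩
      unfold pvApplyAction
      rw [if_neg (by change ¬ ("drive" == "open") = true; decide),
          if_pos (by change ("drive" == "drive") = true; decide)]
      exact h3
  · subst hcase
    refine ⟨⟨by change List.count '(' "clean".toList = 0; decide, ?_⟩, ?_⟩
    · intro x hx
      have hx' : x = s.robot_at := by simpa using hx
      rw [hx']
      exact hrob
    · unfold pvApplyAction
      rw [if_neg (by change ¬ ("clean" == "open") = true; decide),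
          if_neg (by change ¬ ("clean" == "drive") = true; decide),
          if_pos (by change ("clean" == "clean") = true; decide)]
      exact hs

theorem pvKids_good (bo ic so : Bool) (n : PNode) (h : pvGoodNode n) :
    ∀ c ∈ pvKids bo ic so n, pvGoodNode c := by
  intro c hc
  simp only [pvKids, List.mem_map] at hc
  obtain ⟨a, ha, rfl⟩ := hc
  obtain ⟨hact, hstate⟩ := pvGetActions_good n.1 bo ic so h.1 a ha
  refine ⟨hstate, ?_⟩
  intro b hb
  rcases List.mem_append.mp hb with hb | hb
  · exact h.2 b hb
  · rw [List.mem_singleton.mp hb]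
    exact hact

theorem pvJoinCount (sep : List Char) (hsep : sep.count '(' = 0) :
    ∀ parts : List (List Char),
      (PySem.Chars.join sep parts).count '(' = (parts.map (fun p => p.count '(')).sum := by
  intro parts
  induction parts with
  | nil => rw [PySem.Chars.join_nil]; simp
  | cons p rest ih =>
    cases rest with
    | nil => rw [PySem.Chars.join_singleton]; simp
    | cons q rest' =>
      rw [PySem.Chars.join_cons_cons]
      simp only [List.count_append, List.map_cons, List.sum_cons, hsep]
      rw [ih]
      simp only [List.map_cons, List.sum_cons]
      omega

theorem pvFmtAction_count (a : String × List String) (h : pvGoodAct a) :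
    (pvFmtAction a).toList.count '(' = 1 := by
  unfold pvFmtAction
  simp only [String.toList_append, List.count_append, PySem.Str.toList_join]
  rw [pvJoinCount " ".toList (by decide)]
  have : ((a.2.map String.toList).map (fun p => p.count '(')).sum = 0 := by
    apply List.sum_eq_zero
    intro x hx
    simp only [List.map_map, List.mem_map, Function.comp_apply] at hx
    obtain ⟨y, hy, rfl⟩ := hx
    exact h.2 y hy
  rw [this, h.1]
  decide

theorem pvParens_format (plan : List (String × List String)) (h : ∀ a ∈ plan, pvGoodAct a) :
    (pvFormatPlan plan).toList.count '(' = plan.length := by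
  unfold pvFormatPlan
  rw [PySem.Str.toList_join, pvJoinCount "".toList (by decide)]
  have : ((plan.map pvFmtAction).map String.toList).map (fun p => p.count '(') =
      plan.map (fun _ => 1) := by
    simp only [List.map_map]
    apply List.map_congr_left
    intro a ha
    exact pvFmtAction_count a (h a ha)
  rw [this]
  simp

theorem pvSeqFrom_pairs (bo ic so : Bool) (m : Int) :
    ∀ (k : Nat) (ns : List PNode), (∀ n ∈ ns, pvGoodNode n) →
      ∀ q ∈ pvSeqFrom bo ic so m k ns, 0 ≤ q.1 ∧ q.2.toList.count '(' = q.1.toNat := by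
  intro k
  induction k with
  | zero => intro ns hns q hq; simp [pvSeqFrom] at hq
  | succ k ih =>
    intro ns hns q hq
    rw [pvSeqFrom] at hq
    rcases List.mem_append.mp hq with h | h
    · rw [List.mem_flatMap] at h
      obtain ⟨n, hn, hqn⟩ := h
      unfold pvGoalRec at hqn
      split at hqn <;> simp at hqn
      subst hqn
      refine ⟨by positivity, ?_⟩
      simp only [Int.toNat_natCast]
      exact pvParens_format n.2 (hns n hn).2
    · apply ih _ _ q h
      intro c hc
      rw [List.mem_flatMap] at hc
      obtain ⟨p, hp, hcp⟩ := hc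
      unfold pvEKids at hcp
      split at hcp
      · exact pvKids_good bo ic so p (hns p hp) c hcp
      · simp at hcp

theorem pvSeqFrom_sorted (bo ic so : Bool) (m : Int) :
    ∀ (k : Nat) (d : Nat) (ns : List PNode), (∀ n ∈ ns, n.2.length = d) →
      (pvSeqFrom bo ic so m k ns).Pairwise (fun a b => a.1 ≤ b.1) := by
  intro k
  induction k with
  | zero => intro d ns hns; simp [pvSeqFrom]
  | succ k ih =>
    intro d ns hns
    rw [pvSeqFrom]
    have hblock : ∀ q ∈ ns.flatMap pvGoalRec, q.1 = (d : Int) := by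
      intro q hq
      rw [List.mem_flatMap] at hq
      obtain ⟨n, hn, hqn⟩ := hq
      unfold pvGoalRec at hqn
      split at hqn <;> simp at hqn
      rw [hqn, hns n hn]
    have hdepnext : ∀ n ∈ ns.flatMap (pvEKids bo ic so m), n.2.length = d + 1 := by
      intro c hc
      rw [List.mem_flatMap] at hc
      obtain ⟨p, hp, hcp⟩ := hc
      unfold pvEKids at hcp
      split at hcp
      · rw [pvKids_depth bo ic so p c hcp, hns p hp]
      · simp at hcp
    rw [List.pairwise_append]
    refine ⟨?_, ih (d+1) _ hdepnext, ?_⟩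
    · apply List.pairwise_of_forall_mem_list
      intro a ha b hb
      rw [hblock a ha, hblock b hb]
    · intro a ha b hb
      rw [hblock a ha]
      have := pvSeqFrom_fst_le bo ic so m k (d+1) _ hdepnext b hb
      push_cast at this
      omega

-- ---- dictionary algebra for the two accumulator folds ----

theorem pvGetD_foldl_stepB :
    ∀ (seq : List (Int × String)) (bs : PySem.Dict Int (List String)) (d : Int),
      (seq.foldl pvStepB bs).getD d [] =
      ((seq.filter (fun q => q.1 == d)).map (fun q => q.2)).foldl
        (fun b p => if b.contains p then b else b ++ [p]) (bs.getD d []) := by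
  intro seq
  induction seq with
  | nil => intro bs d; simp
  | cons q rest ih =>
    intro bs d
    rw [List.foldl_cons, ih]
    by_cases hqd : q.1 = d
    · subst hqd
      rw [List.filter_cons, if_pos (by simp)]
      simp only [List.map_cons, List.foldl_cons]
      congr 1
      unfold pvStepB
      dsimp only
      rw [PySem.Dict.getD_setdefault_self]
      split
      · rw [PySem.Dict.getD_setdefault_self]
      · rw [PySem.Dict.getD_insert_self]
    · rw [List.filter_cons, if_neg (by simpa using hqd)]
      congr 1
      unfold pvStepB
      dsimp only
      have h1 : (bs.setdefault q.1 []).getD d [] = bs.getD d [] := by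
        rw [PySem.Dict.getD_eq_get?_getD,
            PySem.Dict.get?_setdefault_of_ne _ _ (fun h => hqd h.symm),
            ← PySem.Dict.getD_eq_get?_getD]
      split
      · exact h1
      · rw [PySem.Dict.getD_insert_of_ne _ _ _ (fun h => hqd h.symm)]
        exact h1

theorem pvKeys_foldl_stepB :
    ∀ (seq : List (Int × String)) (bs : PySem.Dict Int (List String)),
      (seq.foldl pvStepB bs).keys = PySem.Set.update bs.keys (seq.map (fun q => q.1)) := by
  intro seq
  induction seq with
  | nil => intro bs; simp [PySem.Set.update]
  | cons q rest ih =>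
    intro bs
    rw [List.foldl_cons, ih]
    have hstep : (pvStepB bs q).keys = PySem.Set.add bs.keys q.1 := by
      unfold pvStepB
      dsimp only
      by_cases hc : bs.contains q.1 = true
      · rw [PySem.Dict.setdefault_of_contains _ _ hc]
        have hadd : PySem.Set.add bs.keys q.1 = bs.keys := by
          unfold PySem.Set.add
          rw [if_pos]
          rw [PySem.Set.contains_iff]
          exact (PySem.Dict.contains_iff_mem_keys bs q.1).mp hc
        split
        · rw [hadd]
        · rw [PySem.Dict.keys_insert_of_contains _ _ hc, hadd]
      · have hc' : bs.contains q.1 = false := by simpa using hc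
        rw [PySem.Dict.setdefault_of_not_contains _ _ hc']
        have hg : (bs.insert q.1 []).getD q.1 ([] : List String) = [] :=
          PySem.Dict.getD_insert_self bs q.1 [] []
        rw [hg]
        rw [if_neg (by simp)]
        rw [PySem.Dict.insert_insert_self]
        rw [PySem.Dict.keys_insert_of_not_contains _ _ hc']
        unfold PySem.Set.add
        rw [if_neg]
        simp only [Bool.not_eq_true]
        rw [← Bool.not_eq_true, PySem.Set.contains_iff]
        intro hmem
        exact absurd ((PySem.Dict.contains_iff_mem_keys bs q.1).mpr hmem) (by simp [hc'])
    rw [hstep]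
    rfl

def pvInv (pbd : PySem.Dict Int (List String)) (ap : PySem.Set String) : Prop :=
  (∀ x, x ∈ ap ↔ ∃ d, x ∈ pbd.getD d []) ∧
  (∀ d x, x ∈ pbd.getD d [] → 0 ≤ d ∧ x.toList.count '(' = d.toNat)

theorem pvStepA_eq_stepB :
    ∀ (seq : List (Int × String)) (pbd : PySem.Dict Int (List String)) (ap : PySem.Set String),
      (∀ q ∈ seq, 0 ≤ q.1 ∧ q.2.toList.count '(' = q.1.toNat) → pvInv pbd ap →
      seq.foldl pvStepA (pbd, ap) =
        (seq.foldl pvStepB pbd, PySem.Set.update ap (seq.map (fun q => q.2))) := by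
  intro seq
  induction seq with
  | nil => intro pbd ap _ _; simp [PySem.Set.update]
  | cons q rest ih =>
    intro pbd ap hqs hinv
    obtain ⟨hq0, hqc⟩ := hqs q (by simp)
    have hrest : ∀ r ∈ rest, 0 ≤ r.1 ∧ r.2.toList.count '(' = r.1.toNat :=
      fun r hr => hqs r (List.mem_cons_of_mem _ hr)
    have hkey : PySem.Set.contains ap q.2 = true ↔ q.2 ∈ pbd.getD q.1 [] := by
      rw [PySem.Set.contains_iff]
      constructor
      · intro h
        obtain ⟨d', hd'⟩ := (hinv.1 q.2).mp h
        obtain ⟨hd'0, hd'c⟩ := hinv.2 d' q.2 hd'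
        have : d' = q.1 := by omega
        rwa [this] at hd'
      · intro h
        exact (hinv.1 q.2).mpr ⟨q.1, h⟩
    by_cases hc : PySem.Set.contains ap q.2 = true
    · have hmem : q.2 ∈ pbd.getD q.1 [] := hkey.mp hc
      have hcd : pbd.contains q.1 = true := by
        by_contra hcd
        rw [PySem.Dict.getD_of_not_contains _ _ (by simpa using hcd)] at hmem
        simp at hmem
      have hstepB : pvStepB pbd q = pbd := by
        unfold pvStepB
        dsimp only
        rw [PySem.Dict.setdefault_of_contains _ _ hcd,
          if_pos (List.contains_iff_mem.mpr hmem)]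
      have hstepA : pvStepA (pbd, ap) q = (pbd, ap) := by
        unfold pvStepA
        rw [if_pos hc]
      have hadd : PySem.Set.add ap q.2 = ap := by
        unfold PySem.Set.add
        rw [if_pos hc]
      rw [List.foldl_cons, hstepA, List.foldl_cons, hstepB, List.map_cons]
      rw [ih pbd ap hrest hinv]
      have hupd : PySem.Set.update ap (q.2 :: rest.map (fun q => q.2)) =
          PySem.Set.update ap (rest.map (fun q => q.2)) := by
        show PySem.Set.update (PySem.Set.add ap q.2) _ = _
        rw [hadd]
      rw [hupd]
    · have hnmem : q.2 ∉ pbd.getD q.1 [] := fun h => hc (hkey.mpr h)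
      have hstepB : pvStepB pbd q = pbd.insert q.1 (pbd.getD q.1 [] ++ [q.2]) := by
        unfold pvStepB
        dsimp only
        by_cases hcd : pbd.contains q.1 = true
        · rw [PySem.Dict.setdefault_of_contains _ _ hcd,
            if_neg (fun h => hnmem (List.contains_iff_mem.mp h))]
        · have hcd' : pbd.contains q.1 = false := by simpa using hcd
          rw [PySem.Dict.setdefault_of_not_contains _ _ hcd']
          rw [PySem.Dict.getD_insert_self]
          rw [if_neg (by simp)]
          rw [PySem.Dict.insert_insert_self]
          rw [PySem.Dict.getD_of_not_contains _ _ hcd']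
      have hstepA : pvStepA (pbd, ap) q =
          (pbd.insert q.1 (pbd.getD q.1 [] ++ [q.2]), PySem.Set.add ap q.2) := by
        unfold pvStepA
        rw [if_neg hc]
      have hinv' : pvInv (pbd.insert q.1 (pbd.getD q.1 [] ++ [q.2])) (PySem.Set.add ap q.2) := by
        constructor
        · intro x
          rw [PySem.Set.mem_add]
          constructor
          · intro h
            rcases h with h | rfl
            · obtain ⟨d', hd'⟩ := (hinv.1 x).mp h
              by_cases hdd : d' = q.1
              · subst hdd
                refine ⟨q.1, ?_⟩
                rw [PySem.Dict.getD_insert_self]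
                exact List.mem_append_left _ hd'
              · refine ⟨d', ?_⟩
                rw [PySem.Dict.getD_insert_of_ne _ _ _ hdd]
                exact hd'
            · refine ⟨q.1, ?_⟩
              rw [PySem.Dict.getD_insert_self]
              simp
          · rintro ⟨d', hd'⟩
            by_cases hdd : d' = q.1
            · subst hdd
              rw [PySem.Dict.getD_insert_self] at hd'
              rcases List.mem_append.mp hd' with h | h
              · exact Or.inl ((hinv.1 x).mpr ⟨q.1, h⟩)
              · exact Or.inr (List.mem_singleton.mp h)
            · rw [PySem.Dict.getD_insert_of_ne _ _ _ hdd] at hd'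
              exact Or.inl ((hinv.1 x).mpr ⟨d', hd'⟩)
        · intro d' x hx
          by_cases hdd : d' = q.1
          · subst hdd
            rw [PySem.Dict.getD_insert_self] at hx
            rcases List.mem_append.mp hx with h | h
            · exact hinv.2 q.1 x h
            · rw [List.mem_singleton.mp h]
              exact ⟨hq0, hqc⟩
          · rw [PySem.Dict.getD_insert_of_ne _ _ _ hdd] at hx
            exact hinv.2 d' x hx
      rw [List.foldl_cons, hstepA, List.foldl_cons, hstepB, List.map_cons]
      rw [ih _ _ hrest hinv']
      rfl

-- ---- grouping: deduped strings in depth order = concatenation of per-depth buckets ----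

theorem pvSetOfListAppend {α : Type} [BEq α] (A B : List α) :
    PySem.Set.ofList (A ++ B) = PySem.Set.update (PySem.Set.ofList A) B := by
  rw [PySem.Set.ofList_eq_foldl, List.foldl_append]
  rfl

theorem pvUpdateAppendLeft {α : Type} [BEq α] [LawfulBEq α] :
    ∀ (B : List α) (s t : List α), (∀ b ∈ B, b ∉ s) →
      PySem.Set.update (s ++ t) B = s ++ PySem.Set.update t B := by
  intro B
  induction B with
  | nil => intro s t _; rfl
  | cons b B ih =>
    intro s t h
    have hbs : b ∉ s := h b (by simp)
    show PySem.Set.update (PySem.Set.add (s ++ t) b) B = s ++ PySem.Set.update (PySem.Set.add t b) B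
    have hca : PySem.Set.add (s ++ t) b = s ++ PySem.Set.add t b := by
      unfold PySem.Set.add
      by_cases hbt : b ∈ t
      · rw [if_pos (by rw [PySem.Set.contains_iff]; exact List.mem_append_right _ hbt),
            if_pos (by rw [PySem.Set.contains_iff]; exact hbt)]
      · rw [if_neg (by rw [PySem.Set.contains_iff]; intro hm; rcases List.mem_append.mp hm with h' | h'
                       exacts [hbs h', hbt h']),
            if_neg (by rw [PySem.Set.contains_iff]; exact hbt)]
        rw [List.append_assoc]
    rw [hca, ih _ _ (fun b' hb' => h b' (List.mem_cons_of_mem _ hb'))]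

theorem pvUpdateDisjoint {α : Type} [BEq α] [LawfulBEq α] (B : List α) (s : List α)
    (h : ∀ b ∈ B, b ∉ s) : PySem.Set.update s B = s ++ PySem.Set.ofList B := by
  have := pvUpdateAppendLeft B s [] h
  rw [List.append_nil] at this
  rw [this]
  rfl

theorem pvUpdateAllMem {α : Type} [BEq α] [LawfulBEq α] :
    ∀ (B : List α) (s : List α), (∀ b ∈ B, b ∈ s) → PySem.Set.update s B = s := by
  intro B
  induction B with
  | nil => intro s _; rfl
  | cons b B ih =>
    intro s h
    show PySem.Set.update (PySem.Set.add s b) B = s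
    have : PySem.Set.add s b = s := by
      unfold PySem.Set.add
      rw [if_pos (by rw [PySem.Set.contains_iff]; exact h b (by simp))]
    rw [this, ih _ (fun b' hb' => h b' (List.mem_cons_of_mem _ hb'))]

theorem pvOfListConst {α : Type} [BEq α] [LawfulBEq α] (A : List α) (d : α)
    (h : ∀ a ∈ A, a = d) (hne : A ≠ []) : PySem.Set.ofList A = [d] := by
  cases A with
  | nil => exact absurd rfl hne
  | cons a A' =>
    have ha : a = d := h a (by simp)
    subst ha
    show PySem.Set.update (PySem.Set.add [] a) A' = [a]
    have h1 : PySem.Set.add ([] : List α) a = [a] := rfl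
    rw [h1, pvUpdateAllMem A' [a] (fun b hb => by rw [h b (List.mem_cons_of_mem _ hb)]; simp)]

theorem pvDropWhileHeadFalse {α : Type} (p : α → Bool) :
    ∀ (l : List α) x xs, l.dropWhile p = x :: xs → p x = false := by
  intro l
  induction l with
  | nil => intro x xs h; simp at h
  | cons a l ih =>
    intro x xs h
    by_cases hpa : p a = true
    · rw [List.dropWhile_cons_of_pos hpa] at h
      exact ih x xs h
    · rw [List.dropWhile_cons_of_neg (by simpa using hpa)] at h
      cases h
      simpa using hpa

theorem pvGroupingAux :
    ∀ (N : Nat) (seq : List (Int × String)), seq.length ≤ N →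
      seq.Pairwise (fun a b => a.1 ≤ b.1) →
      (∀ q ∈ seq, 0 ≤ q.1 ∧ q.2.toList.count '(' = q.1.toNat) →
      PySem.Set.ofList (seq.map (fun q => q.2)) =
        (PySem.Set.ofList (seq.map (fun q => q.1))).flatMap
          (fun d => PySem.Set.ofList (((seq.filter (fun q => q.1 == d)).map (fun q => q.2)))) := by
  intro N
  induction N with
  | zero =>
    intro seq hlen _ _
    have : seq = [] := List.length_eq_zero_iff.mp (Nat.le_zero.mp hlen)
    subst this
    rfl
  | succ N ih =>
    intro seq hlen hsort hcnt
    cases seq with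
    | nil => rfl
    | cons q rest =>
      have hq0 := (hcnt q (by simp)).1
      set p : (Int × String) → Bool := fun x => x.1 == q.1 with hp
      have hpq : p q = true := by simp [hp]
      set T : List (Int × String) := (q :: rest).takeWhile p with hT
      set D : List (Int × String) := (q :: rest).dropWhile p with hD
      have hTD : T ++ D = q :: rest := List.takeWhile_append_dropWhile
      have hTmem : ∀ x ∈ T, x.1 = q.1 := by
        intro x hx
        have := List.mem_takeWhile_imp hx
        simpa [hp] using this
      have hDrest : D = rest.dropWhile p := by rw [hD, List.dropWhile_cons_of_pos hpq]
      have hDlen : D.length ≤ N := by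
        rw [hDrest]
        have := List.length_dropWhile_le p rest
        have hr : rest.length ≤ N := by simpa using hlen
        omega
      have hDsub : D.Sublist (q :: rest) := by rw [← hTD]; exact List.sublist_append_right T D
      have hDsort : D.Pairwise (fun a b => a.1 ≤ b.1) := hsort.sublist hDsub
      have hDcnt : ∀ x ∈ D, 0 ≤ x.1 ∧ x.2.toList.count '(' = x.1.toNat :=
        fun x hx => hcnt x (hDsub.subset hx)
      have hDgt : ∀ x ∈ D, q.1 < x.1 := by
        intro x hx
        cases hDD : D with
        | nil => rw [hDD] at hx; simp at hx
        | cons f D' =>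
          have hfD : rest.dropWhile p = f :: D' := by rw [← hDrest, hDD]
          have hpf : p f = false := pvDropWhileHeadFalse p rest f D' hfD
          have hfq : f.1 ≠ q.1 := by simpa [hp] using hpf
          have hfrest : f ∈ rest := (List.dropWhile_sublist p).subset (by rw [hfD]; simp)
          have hqle : ∀ b ∈ rest, q.1 ≤ b.1 := by
            have := List.pairwise_cons.mp hsort
            exact this.1
          have hqf : q.1 < f.1 := lt_of_le_of_ne (hqle f hfrest) (Ne.symm hfq)
          rw [hDD] at hx
          rcases List.mem_cons.mp hx with rfl | hx'
          · exact hqf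
          · have hpw := List.pairwise_cons.mp (hDD ▸ hDsort)
            exact lt_of_lt_of_le hqf (hpw.1 x hx')
      have hTne : T ≠ [] := by rw [hT, List.takeWhile_cons_of_pos hpq]; simp
      have hTcnt : ∀ x ∈ T, x.2.toList.count '(' = q.1.toNat := by
        intro x hx
        have hxseq : x ∈ q :: rest := by rw [← hTD]; exact List.mem_append_left _ hx
        have := (hcnt x hxseq).2
        rw [this, hTmem x hx]
      have hsnd_disj : ∀ b ∈ D.map (fun q => q.2), b ∉ PySem.Set.ofList (T.map (fun q => q.2)) := by
        intro b hb hbT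
        rw [PySem.Set.mem_ofList] at hbT
        rw [List.mem_map] at hb hbT
        obtain ⟨x, hx, rfl⟩ := hb
        obtain ⟨y, hy, hyx⟩ := hbT
        have h1 : y.2.toList.count '(' = q.1.toNat := hTcnt y hy
        have h2 : x.2.toList.count '(' = x.1.toNat := (hDcnt x hx).2
        have h3 := hDgt x hx
        rw [hyx] at h1
        omega
      have hfst_disj : ∀ b ∈ D.map (fun q => q.1), b ∉ ([q.1] : List Int) := by
        intro b hb hbq
        rw [List.mem_map] at hb
        obtain ⟨x, hx, rfl⟩ := hb
        have := hDgt x hx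
        rw [List.mem_singleton] at hbq
        omega
      rw [← hTD]
      rw [List.map_append, List.map_append]
      rw [pvSetOfListAppend, pvUpdateDisjoint _ _ hsnd_disj]
      rw [pvSetOfListAppend, pvOfListConst (T.map (fun q => q.1)) q.1
            (by intro a ha; rw [List.mem_map] at ha; obtain ⟨x, hx, rfl⟩ := ha; exact hTmem x hx)
            (by simpa using hTne),
          pvUpdateDisjoint _ _ hfst_disj]
      rw [List.flatMap_append]
      have hhead : ([q.1] : List Int).flatMap
          (fun d => PySem.Set.ofList (((T ++ D).filter (fun q => q.1 == d)).map (fun q => q.2))) =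
          PySem.Set.ofList (T.map (fun q => q.2)) := by
        simp only [List.flatMap_cons, List.flatMap_nil, List.append_nil]
        congr 1
        rw [List.filter_append]
        rw [List.filter_eq_self.mpr (by intro x hx; simpa using hTmem x hx)]
        rw [List.filter_eq_nil_iff.mpr (by intro x hx; simp only [beq_iff_eq]; have := hDgt x hx; omega)]
        simp
      rw [hhead]
      congr 1
      have htail : ∀ d ∈ PySem.Set.ofList (D.map (fun q => q.1)),
          PySem.Set.ofList (((T ++ D).filter (fun q => q.1 == d)).map (fun q => q.2)) =
          PySem.Set.ofList ((D.filter (fun q => q.1 == d)).map (fun q => q.2)) := by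
        intro d hd
        rw [PySem.Set.mem_ofList, List.mem_map] at hd
        obtain ⟨x, hx, rfl⟩ := hd
        have hdq := hDgt x hx
        congr 2
        rw [List.filter_append]
        rw [List.filter_eq_nil_iff.mpr (by intro y hy; simp only [beq_iff_eq]; rw [hTmem y hy]; omega)]
        rw [List.nil_append]
      rw [List.flatMap_congr htail]
      exact ih D hDlen hDsort hDcnt

-- ---- named sequences/dicts for the final assembly ----

def pvRoot : PNode := (pvMakeInit, [])

def pvLevelSeq (bo ic so : Bool) (m : Int) : List (Int × String) :=
  pvSeqFrom bo ic so m (m+1).toNat [pvRoot]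

def pvPre (bo ic so : Bool) (m : Int) : List (Int × String) :=
  pvPreSeq bo ic so m ((m+1).toNat+1) pvRoot

def pvDA (bo ic so : Bool) (m : Int) : PySem.Dict Int (List String) :=
  (pvLevelSeq bo ic so m).foldl pvStepB PySem.Dict.empty

def pvDB (bo ic so : Bool) (m : Int) : PySem.Dict Int (List String) :=
  (pvPre bo ic so m).foldl pvStepB PySem.Dict.empty

theorem pvRoot_good : pvGoodNode pvRoot := ⟨Or.inl rfl, by intro a ha; simp [pvRoot] at ha⟩

theorem pvLevelSeq_pairs (bo ic so : Bool) (m : Int) :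
    ∀ q ∈ pvLevelSeq bo ic so m, 0 ≤ q.1 ∧ q.2.toList.count '(' = q.1.toNat := by
  apply pvSeqFrom_pairs
  intro n hn
  rw [List.mem_singleton.mp hn]
  exact pvRoot_good

theorem pvLevelSeq_sorted (bo ic so : Bool) (m : Int) :
    (pvLevelSeq bo ic so m).Pairwise (fun a b => a.1 ≤ b.1) := by
  apply pvSeqFrom_sorted bo ic so m _ 0
  intro n hn
  rw [List.mem_singleton.mp hn]
  rfl

theorem pvFilters_eq (bo ic so : Bool) (m : Int) (d : Int) :
    (pvPre bo ic so m).filter (fun q => q.1 == d) =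
    (pvLevelSeq bo ic so m).filter (fun q => q.1 == d) := by
  have h := pvFilter_pre_eq_level bo ic so m (m+1).toNat ((m+1).toNat+1) 0 [pvRoot]
    (by intro n hn; rw [List.mem_singleton.mp hn]; rfl)
    (by simp) (by omega) d
  simpa [pvPre, pvLevelSeq] using h

theorem pvFoldAdd_ofList (l : List String) (b : List String) :
    l.foldl (fun b p => if b.contains p then b else b ++ [p]) b = PySem.Set.update b l := rfl

theorem pvGetD_DA (bo ic so : Bool) (m : Int) (d : Int) :
    (pvDA bo ic so m).getD d [] =
    PySem.Set.ofList (((pvLevelSeq bo ic so m).filter (fun q => q.1 == d)).map (fun q => q.2)) := by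
  unfold pvDA
  rw [pvGetD_foldl_stepB, PySem.Dict.getD_empty, pvFoldAdd_ofList]
  rfl

theorem pvGetD_DB (bo ic so : Bool) (m : Int) (d : Int) :
    (pvDB bo ic so m).getD d [] =
    PySem.Set.ofList (((pvLevelSeq bo ic so m).filter (fun q => q.1 == d)).map (fun q => q.2)) := by
  unfold pvDB
  rw [pvGetD_foldl_stepB, PySem.Dict.getD_empty, pvFoldAdd_ofList, pvFilters_eq]
  rfl

theorem pvKeys_DA (bo ic so : Bool) (m : Int) :
    (pvDA bo ic so m).keys = PySem.Set.ofList ((pvLevelSeq bo ic so m).map (fun q => q.1)) := by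
  unfold pvDA
  rw [pvKeys_foldl_stepB, PySem.Dict.keys_empty]
  rfl

theorem pvKeys_DB (bo ic so : Bool) (m : Int) :
    (pvDB bo ic so m).keys = PySem.Set.ofList ((pvPre bo ic so m).map (fun q => q.1)) := by
  unfold pvDB
  rw [pvKeys_foldl_stepB, PySem.Dict.keys_empty]
  rfl

theorem pvMemMapFst (seq : List (Int × String)) (d : Int) :
    d ∈ seq.map (fun q => q.1) ↔ seq.filter (fun q => q.1 == d) ≠ [] := by
  rw [List.mem_map]
  constructor
  · rintro ⟨q, hq, rfl⟩ h
    rw [List.filter_eq_nil_iff] at h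
    exact h q hq (by simp)
  · intro h
    cases hf : seq.filter (fun q => q.1 == d) with
    | nil => exact absurd hf h
    | cons x xs =>
      have hx : x ∈ seq.filter (fun q => q.1 == d) := by rw [hf]; simp
      rw [List.mem_filter] at hx
      exact ⟨x, hx.1, by simpa using hx.2⟩

theorem pvUpdateSublist {α : Type} [BEq α] :
    ∀ (l s : List α), (PySem.Set.update s l).Sublist (s ++ l) := by
  intro l
  induction l with
  | nil => intro s; simp [PySem.Set.update]
  | cons b l ih =>
    intro s
    show (PySem.Set.update (PySem.Set.add s b) l).Sublist _
    have h1 := ih (PySem.Set.add s b)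
    have h2 : (PySem.Set.add s b).Sublist (s ++ [b]) := by
      unfold PySem.Set.add
      split
      · exact List.sublist_append_left s [b]
      · exact List.Sublist.refl _
    have h3 := h2.append_right l
    rw [List.append_assoc] at h3
    exact h1.trans (by simpa using h3)

theorem pvOfListSublist {α : Type} [BEq α] (l : List α) : (PySem.Set.ofList l).Sublist l := by
  have := pvUpdateSublist l ([] : List α)
  simpa [PySem.Set.ofList_eq_foldl] using this

theorem pvOfListNodupSelf {α : Type} [BEq α] [LawfulBEq α] :
    ∀ l : List α, l.Nodup → PySem.Set.ofList l = l := by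
  intro l
  induction l with
  | nil => intro _; rfl
  | cons a l ih =>
    intro h
    rw [List.nodup_cons] at h
    show PySem.Set.update (PySem.Set.add [] a) l = a :: l
    have h1 : PySem.Set.add ([] : List α) a = [a] := rfl
    rw [h1, pvUpdateDisjoint l [a]
      (by intro b hb hba; rw [List.mem_singleton] at hba; exact h.1 (hba ▸ hb))]
    rw [ih h.2]
    rfl

theorem pvOfListPairwiseLt (l : List Int) (h : l.Pairwise (· ≤ ·)) :
    (PySem.Set.ofList l).Pairwise (· < ·) := by
  have hle : (PySem.Set.ofList l).Pairwise (· ≤ ·) := h.sublist (pvOfListSublist l)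
  have hnd : (PySem.Set.ofList l).Nodup := PySem.Set.nodup_ofList l
  exact (hle.and hnd).imp (fun h => lt_of_le_of_ne h.1 h.2)

theorem pvGrouping :
    ∀ (seq : List (Int × String)), seq.Pairwise (fun a b => a.1 ≤ b.1) →
      (∀ q ∈ seq, 0 ≤ q.1 ∧ q.2.toList.count '(' = q.1.toNat) →
      PySem.Set.ofList (seq.map (fun q => q.2)) =
        (PySem.Set.ofList (seq.map (fun q => q.1))).flatMap
          (fun d => PySem.Set.ofList (((seq.filter (fun q => q.1 == d)).map (fun q => q.2)))) :=
  fun seq => pvGroupingAux seq.length seq le_rfl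

theorem pvA_char (bo ic so : Bool) (m : Int) (hm : 0 ≤ m) :
    enumerate_plans bo ic so m =
      ((pvDA bo ic so m).items,
        PySem.Set.ofList ((pvLevelSeq bo ic so m).map (fun q => q.2))) := by
  unfold enumerate_plans
  have h1 := pvBfs_levels bo ic so m (m+1).toNat 0 [(pvMakeInit, [])] PySem.Dict.empty PySem.Set.empty
    (by intro n hn; rw [List.mem_singleton.mp hn]; rfl) (by exact_mod_cast hm) (by simp)
  have h2 := pvStepA_eq_stepB (pvLevelSeq bo ic so m) PySem.Dict.empty PySem.Set.empty
    (pvLevelSeq_pairs bo ic so m)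
    (by constructor
        · intro x
          constructor
          · intro hx; simp [PySem.Set.empty] at hx
          · rintro ⟨d, hd⟩; rw [PySem.Dict.getD_empty] at hd; simp at hd
        · intro d x hx; rw [PySem.Dict.getD_empty] at hx; simp at hx)
  dsimp only
  rw [h1]
  rw [show pvSeqFrom bo ic so m (m+1).toNat [(pvMakeInit, [])] = pvLevelSeq bo ic so m from rfl]
  rw [h2]
  rfl

theorem enumerate_plans_spec' (bo ic so : Bool) (m : Int) :
    enumerate_plans bo ic so m = enumerate_plans_alt bo ic so m := by
  by_cases hm : 0 ≤ m
  swap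
  · have hm' : m < 0 := by omega
    have hA : pvBfs bo ic so m [(pvMakeInit, [])] PySem.Dict.empty PySem.Set.empty
        = (PySem.Dict.empty, PySem.Set.empty) := by
      apply pvBfs_junk
      intro n hn
      rw [List.mem_singleton.mp hn]
      simpa using hm'
    have hB : pvDfs bo ic so m pvMakeInit [] PySem.Dict.empty = PySem.Dict.empty := by
      rw [pvDfs]
      rw [if_pos (by simpa using hm')]
    unfold enumerate_plans enumerate_plans_alt
    rw [hA, hB]
    rfl
  · -- keys / buckets of the two folded dictionaries agree
    have hkeysetA : ∀ d, d ∈ (pvDA bo ic so m).keys ↔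
        (pvLevelSeq bo ic so m).filter (fun q => q.1 == d) ≠ [] := by
      intro d; rw [pvKeys_DA, PySem.Set.mem_ofList, pvMemMapFst]
    have hkeysetB : ∀ d, d ∈ (pvDB bo ic so m).keys ↔
        (pvLevelSeq bo ic so m).filter (fun q => q.1 == d) ≠ [] := by
      intro d; rw [pvKeys_DB, PySem.Set.mem_ofList, pvMemMapFst, pvFilters_eq]
    have hndA : (pvDA bo ic so m).keys.Nodup := by
      rw [pvKeys_DA]; exact PySem.Set.nodup_ofList _
    have hndB : (pvDB bo ic so m).keys.Nodup := by
      rw [pvKeys_DB]; exact PySem.Set.nodup_ofList _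
    have hperm : (pvDA bo ic so m).keys.Perm (pvDB bo ic so m).keys :=
      (List.perm_ext_iff_of_nodup hndA hndB).mpr (fun d => by rw [hkeysetA, hkeysetB])
    have hitemsA : (pvDA bo ic so m).items =
        (pvDA bo ic so m).keys.map (fun d => (d, (pvDA bo ic so m).getD d [])) :=
      PySem.Dict.items_eq_map_keys _ hndA []
    have hitemsB : (pvDB bo ic so m).items =
        (pvDB bo ic so m).keys.map (fun d => (d, (pvDA bo ic so m).getD d [])) := by
      rw [PySem.Dict.items_eq_map_keys _ hndB []]
      apply List.map_congr_left
      intro d _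
      rw [pvGetD_DB, pvGetD_DA]
    have hkpw : (pvDA bo ic so m).keys.Pairwise (· < ·) := by
      rw [pvKeys_DA]
      exact pvOfListPairwiseLt _ (List.pairwise_map.mpr (pvLevelSeq_sorted bo ic so m))
    have hpwA : ((pvDA bo ic so m).items).Pairwise (fun a b => a.1 < b.1) := by
      rw [hitemsA]
      exact List.pairwise_map.mpr hkpw
    have hsorted : PySem.List.sorted (pvDB bo ic so m).items (fun kv => kv.1) false =
        (pvDA bo ic so m).items := by
      apply PySem.List.sorted_eq_of_perm_of_pairwise_lt
      · rw [hitemsA, hitemsB]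
        exact (hperm.map _)
      · exact hpwA
    have hfstid : ((pvDA bo ic so m).items.map (fun p => p.1)) = (pvDA bo ic so m).keys := by
      rw [hitemsA, List.map_map]
      exact List.map_id _
    have hofl : (PySem.Dict.ofList ((pvDA bo ic so m).items)).items = (pvDA bo ic so m).items := by
      show (PySem.Dict.update PySem.Dict.empty _).items = _
      unfold PySem.Dict.update
      have hfresh := PySem.Dict.items_foldl_insert_fresh ((pvDA bo ic so m).items)
        (fun p => p.1) (fun p => p.2) PySem.Dict.empty
        (by intro a _; exact PySem.Dict.contains_empty _)
        (by rw [hfstid]; exact hndA)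
      simpa using hfresh
    have hbucket : ∀ d x, x ∈ (pvDA bo ic so m).getD d [] →
        0 ≤ d ∧ x.toList.count '(' = d.toNat := by
      intro d x hx
      rw [pvGetD_DA, PySem.Set.mem_ofList, List.mem_map] at hx
      obtain ⟨q, hq, rfl⟩ := hx
      rw [List.mem_filter] at hq
      have h1 := pvLevelSeq_pairs bo ic so m q hq.1
      have h2 : q.1 = d := by simpa using hq.2
      rw [← h2]
      exact h1
    -- the flattened bucket union is the deduped level-order string list
    have hflat : PySem.Set.ofList (((pvDA bo ic so m).items.map (fun kv => kv.2)).flatten) =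
        PySem.Set.ofList ((pvLevelSeq bo ic so m).map (fun q => q.2)) := by
      have hsnd : (pvDA bo ic so m).items.map (fun kv => kv.2) =
          (pvDA bo ic so m).keys.map (fun d => (pvDA bo ic so m).getD d []) := by
        rw [hitemsA, List.map_map]
        rfl
      rw [hsnd, ← List.flatMap_def]
      rw [pvGrouping (pvLevelSeq bo ic so m) (pvLevelSeq_sorted bo ic so m)
        (pvLevelSeq_pairs bo ic so m)]
      rw [← pvKeys_DA]
      rw [List.flatMap_congr (fun d _ => (pvGetD_DA bo ic so m d).symm)]
      apply pvOfListNodupSelf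
      rw [List.nodup_flatMap]
      constructor
      · intro d _
        rw [pvGetD_DA]
        exact PySem.Set.nodup_ofList _
      · apply hkpw.imp
        intro a b hab
        intro x hxa hxb
        have h1 := hbucket a x hxa
        have h2 := hbucket b x hxb
        omega
    rw [pvA_char bo ic so m hm]
    have hBval : enumerate_plans_alt bo ic so m =
        ((pvDA bo ic so m).items,
          PySem.Set.ofList (((pvDA bo ic so m).items.map (fun kv => kv.2)).flatten)) := by
      unfold enumerate_plans_alt
      rw [pvDfs_eq_foldl bo ic so m ((m+1).toNat+1) pvMakeInit [] PySem.Dict.empty (by simp)]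
      dsimp only
      rw [show (pvPreSeq bo ic so m ((m+1).toNat+1) (pvMakeInit, [])).foldl pvStepB
            PySem.Dict.empty = pvDB bo ic so m from rfl]
      rw [hsorted]
      rw [show (PySem.Dict.ofList ((pvDA bo ic so m).items)).values =
            (PySem.Dict.ofList ((pvDA bo ic so m).items)).items.map (fun kv => kv.2) from rfl]
      rw [hofl]
    rw [hBval, hflat]

-- ===== VERDICT (by name: the statement is the Claim_ definition above) =====
theorem enumerate_plans_spec : Claim_equal_enumerate_plans := by
  unfold Claim_equal_enumerate_plans
  intro bo ic so m _
  unfold Spec_enumerate_plans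
  exact enumerate_plans_spec' bo ic so m
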